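-- pv_equiv track=rewrite | github.com/2EU55/GitHub-Repo | src/sales_schema.py | suggest_sales_mapping
-- ===== SOURCE A (Python) =====
-- def suggest_sales_mapping(columns):
--     cols = list(columns)
--     lower = {c: str(c).lower() for c in cols}
--
--     def pick(*needles):
--         for c in cols:
--             if any(n in lower[c] for n in needles):
--                 return c
--         return None
--
--     return {
--         "销售人员": pick("销售", "seller", "salesperson", "owner", "人员"),
--         "部门": pick("部门", "dept", "department"),
--         "区域": pick("区域", "region", "area", "城市"),
--         "客户名称": pick("客户", "customer", "client"),
--         "产品名称": pick("产品", "product", "sku"),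
--         "消费金额": pick("金额", "消费", "营收", "revenue", "amount", "gmv"),
--         "交易日期": pick("日期", "时间", "date", "time"),
--     }
-- ===== SOURCE B (Python) =====
-- FIELDS = [
--     ("销售人员", ("销售", "seller", "salesperson", "owner", "人员")),
--     ("部门", ("部门", "dept", "department")),
--     ("区域", ("区域", "region", "area", "城市")),
--     ("客户名称", ("客户", "customer", "client")),
--     ("产品名称", ("产品", "product", "sku")),
--     ("消费金额", ("金额", "消费", "营收", "revenue", "amount", "gmv")),
--     ("交易日期", ("日期", "时间", "date", "time")),
-- ]
--
-- def suggest_sales_mapping(columns):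
--     # one pass over the columns, filling each still-empty field on first match
--     slots = [[key, needles, None] for key, needles in FIELDS]
--     for c in columns:
--         low = str(c).lower()
--         for slot in slots:
--             if slot[2] is None and any(n in low for n in slot[1]):
--                 slot[2] = c
--     return {key: val for key, _, val in slots}
-- ===== Notes on version B (the rewrite author's own statement) =====
-- stated objective: alternative
-- what changed: Replaces A's seven separate scans over the column list (one per canonical field, via pick) with a single pass over the columns that maintains the set of still-unfilled fields and assigns each column to any unfilled field whose needle matches.
import Mathlib
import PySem

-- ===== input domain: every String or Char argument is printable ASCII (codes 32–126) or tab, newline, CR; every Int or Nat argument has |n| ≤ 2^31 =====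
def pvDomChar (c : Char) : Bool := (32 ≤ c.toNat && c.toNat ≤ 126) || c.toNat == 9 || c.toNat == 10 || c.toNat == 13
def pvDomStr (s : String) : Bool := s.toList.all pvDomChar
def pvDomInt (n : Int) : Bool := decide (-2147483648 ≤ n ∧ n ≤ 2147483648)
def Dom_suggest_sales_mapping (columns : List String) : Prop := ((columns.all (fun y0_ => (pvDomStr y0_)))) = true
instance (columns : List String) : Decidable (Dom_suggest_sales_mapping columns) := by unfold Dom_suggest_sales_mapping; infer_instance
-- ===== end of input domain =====

-- B makes one pass over the columns maintaining the still-unfilled fields, instead of A's seven per-field scans; return value only.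

-- ===== PORT A =====
-- inner helper pick(*needles): loop over cols, return first column whose lowered form contains a needle
-- (lower[c] is a dict lookup that always succeeds since c ∈ cols; ported as getD with unused default)
def pvPick (cols : List String) (lower : PySem.Dict String String) (needles : List String) : Option String :=
  cols.find? (fun c => needles.any (fun n => PySem.Str.isIn n (lower.getD c "")))

def suggest_sales_mapping (columns : List String) : List (String × Option String) :=
  let cols := columns
  let lower := cols.foldl (fun d c => d.insert c (PySem.Str.lower c)) PySem.Dict.empty
  [("销售人员", pvPick cols lower ["销售", "seller", "salesperson", "owner", "人员"]),
   ("部门", pvPick cols lower ["部门", "dept", "department"]),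
   ("区域", pvPick cols lower ["区域", "region", "area", "城市"]),
   ("客户名称", pvPick cols lower ["客户", "customer", "client"]),
   ("产品名称", pvPick cols lower ["产品", "product", "sku"]),
   ("消费金额", pvPick cols lower ["金额", "消费", "营收", "revenue", "amount", "gmv"]),
   ("交易日期", pvPick cols lower ["日期", "时间", "date", "time"])]

-- ===== PORT B =====
def pvFields : List (String × List String) :=
  [("销售人员", ["销售", "seller", "salesperson", "owner", "人员"]),
   ("部门", ["部门", "dept", "department"]),
   ("区域", ["区域", "region", "area", "城市"]),
   ("客户名称", ["客户", "customer", "client"]),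
   ("产品名称", ["产品", "product", "sku"]),
   ("消费金额", ["金额", "消费", "营收", "revenue", "amount", "gmv"]),
   ("交易日期", ["日期", "时间", "date", "time"])]

def suggest_sales_mapping_alt (columns : List String) : List (String × Option String) :=
  let slots : List (String × List String × Option String) :=
    pvFields.map (fun kn => (kn.1, kn.2, none))
  let final := columns.foldl (fun st c =>
      let low := PySem.Str.lower c
      st.map (fun s =>
        if s.2.2 = none ∧ s.2.1.any (fun n => PySem.Str.isIn n low) then (s.1, s.2.1, some c) else s))
    slots
  final.map (fun s => (s.1, s.2.2))

-- ===== PRECONDITION & SPEC =====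
def Spec_suggest_sales_mapping (columns : List String) (out : List (String × Option String)) : Prop := out = suggest_sales_mapping_alt columns
instance (columns : List String) (out : List (String × Option String)) : Decidable (Spec_suggest_sales_mapping columns out) := by unfold Spec_suggest_sales_mapping; infer_instance

-- ===== CLAIM (what is proved, stated in full; the proofs are below) =====
def Claim_equal_suggest_sales_mapping : Prop := ∀ (columns : List String), Dom_suggest_sales_mapping columns → Spec_suggest_sales_mapping columns (suggest_sales_mapping columns)

-- ===== LEMMAS AND PROOFS =====

-- the dict {c: c.lower() for c in cols} returns c.lower() for any c ∈ cols
theorem pv_lower_dict (cols : List String) (c : String) (d0 : PySem.Dict String String)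
    (h : c ∈ cols ∨ d0.get? c = some (PySem.Str.lower c)) :
    (cols.foldl (fun d x => d.insert x (PySem.Str.lower x)) d0).getD c "" = PySem.Str.lower c := by
  induction cols generalizing d0 with
  | nil =>
    rcases h with h | h
    · cases h
    · simp [PySem.Dict.getD_eq_get?_getD, h]
  | cons x xs ih =>
    simp only [List.foldl_cons]
    apply ih
    by_cases hx : c ∈ xs
    · exact Or.inl hx
    · right
      rcases h with h | h
      · rcases List.mem_cons.mp h with rfl | h
        · simp [PySem.Dict.get?_insert_self]
        · exact absurd h hx
      · by_cases hcx : x = c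
        · subst hcx; simp [PySem.Dict.get?_insert_self]
        · rw [PySem.Dict.get?_insert_of_ne _ _ (by simpa using Ne.symm hcx)]; exact h

-- find? only evaluates the predicate on members
theorem pv_find?_congr_mem {α : Type} (l : List α) (p q : α → Bool)
    (h : ∀ x ∈ l, p x = q x) : l.find? p = l.find? q := by
  induction l with
  | nil => rfl
  | cons x xs ih =>
    simp only [List.find?_cons, h x (List.mem_cons_self)]
    cases q x
    · exact ih (fun y hy => h y (List.mem_cons_of_mem _ hy))
    · rfl

-- a fold that maps the whole state each step = per-element folds
theorem pv_foldl_map {α β : Type} (g : β → α → α) (cols : List β) (init : List α) :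
    cols.foldl (fun st c => st.map (g c)) init = init.map (fun x => cols.foldl (fun s c => g c s) x) := by
  induction cols generalizing init with
  | nil => simp
  | cons c cs ih => simp only [List.foldl_cons, ih, List.map_map]; rfl

-- once a slot is filled it stays filled
theorem pv_slot_fold_some (ns : List String) (cols : List String) (x : String) :
    cols.foldl (fun (v : Option String) c =>
      if v = none ∧ ns.any (fun n => PySem.Str.isIn n (PySem.Str.lower c)) then some c else v) (some x) = some x := by
  induction cols with
  | nil => rfl
  | cons c cs ih => simpa using ih

-- per-slot fold computes the first matching column
theorem pv_slot_fold (ns : List String) (cols : List String) :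
    cols.foldl (fun (v : Option String) c =>
      if v = none ∧ ns.any (fun n => PySem.Str.isIn n (PySem.Str.lower c)) then some c else v) none
    = cols.find? (fun c => ns.any (fun n => PySem.Str.isIn n (PySem.Str.lower c))) := by
  induction cols with
  | nil => rfl
  | cons c cs ih =>
    rw [List.foldl_cons]
    cases hany : ns.any (fun n => PySem.Str.isIn n (PySem.Str.lower c)) with
    | true =>
      rw [if_pos ⟨rfl, rfl⟩,
        List.find?_cons_of_pos (p := fun c => ns.any fun n => PySem.Str.isIn n (PySem.Str.lower c)) hany]
      exact pv_slot_fold_some ns cs c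
    | false =>
      have hnp : ¬ ((fun c => ns.any fun n => PySem.Str.isIn n (PySem.Str.lower c)) c = true) := by
        simp only [hany]; exact Bool.false_ne_true
      rw [if_neg (by simp),
        List.find?_cons_of_neg (p := fun c => ns.any fun n => PySem.Str.isIn n (PySem.Str.lower c)) hnp]
      exact ih

-- the triple fold keeps key and needles and folds the value
theorem pv_triple_fold (cols : List String) (k : String) (ns : List String) (v0 : Option String) :
    cols.foldl (fun (s : String × List String × Option String) c =>
        if s.2.2 = none ∧ s.2.1.any (fun n => PySem.Str.isIn n (PySem.Str.lower c)) then (s.1, s.2.1, some c) else s)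
      (k, ns, v0)
    = (k, ns, cols.foldl (fun (v : Option String) c =>
        if v = none ∧ ns.any (fun n => PySem.Str.isIn n (PySem.Str.lower c)) then some c else v) v0) := by
  induction cols generalizing v0 with
  | nil => rfl
  | cons c cs ih =>
    rw [List.foldl_cons, List.foldl_cons]
    dsimp only
    by_cases h : v0 = none ∧ ns.any (fun n => PySem.Str.isIn n (PySem.Str.lower c)) = true
    · rw [if_pos h, if_pos h]
      exact ih (some c)
    · rw [if_neg h, if_neg h]
      exact ih v0

-- A's pick equals the first-match over true lowered columns
theorem pv_pick_eq (cols : List String) (ns : List String) :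
    pvPick cols (cols.foldl (fun d c => d.insert c (PySem.Str.lower c)) PySem.Dict.empty) ns
    = cols.find? (fun c => ns.any (fun n => PySem.Str.isIn n (PySem.Str.lower c))) := by
  unfold pvPick
  apply pv_find?_congr_mem
  intro x hx
  rw [pv_lower_dict cols x PySem.Dict.empty (Or.inl hx)]

-- ===== VERDICT (by name: the statement is the Claim_ definition above) =====
theorem suggest_sales_mapping_spec : Claim_equal_suggest_sales_mapping := by
  intro columns _
  unfold Spec_suggest_sales_mapping suggest_sales_mapping suggest_sales_mapping_alt
  simp only [pvFields, List.map_cons, List.map_nil]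
  rw [pv_foldl_map]
  simp only [List.map_cons, List.map_nil, pv_triple_fold, pv_slot_fold, pv_pick_eq]
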